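-- pv_equiv track=rewrite | github.com/Ansai-2000/CodingTestStudy | 프로그래머스/unrated/160585. 혼자서 하는 틱택토/혼자서 하는 틱택토.py | tic3
-- ===== SOURCE A (Python) =====
-- def tic3(board,y,x,o,n):
--     if n==3:
--         return True
--     if y < 0 or y >= 3 or x < 0 or x >= 3:
--         return False
--     if board[y][x] == o:
--         return tic3(board,y+1,x+1,o,n+1)
--     else:
--         return False
-- ===== SOURCE B (Python) =====
-- def tic3(board, y, x, o, n):
--     if n >= 3:
--         return n == 3
--     steps = 3 - n
--     if y < 0 or x < 0 or y + steps > 3 or x + steps > 3: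
--         return False
--     return all(board[y + j][x + j] == o for j in range(steps))
-- ===== Notes on version B (the rewrite author's own statement) =====
-- stated objective: alternative
-- what changed: Replaces A's recursion over (y,x,n) by a non-recursive arithmetic feasibility check (a win needs exactly 3-n further matches, impossible unless 0<=y, 0<=x and y+(3-n)<=3, x+(3-n)<=3) followed by an all() over the at-most-3 remaining diagonal cells.
-- outside the precondition, e.g. on tic3(['a'], 0, 0, 'z', 0): A returns False, B returns False
import Mathlib
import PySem

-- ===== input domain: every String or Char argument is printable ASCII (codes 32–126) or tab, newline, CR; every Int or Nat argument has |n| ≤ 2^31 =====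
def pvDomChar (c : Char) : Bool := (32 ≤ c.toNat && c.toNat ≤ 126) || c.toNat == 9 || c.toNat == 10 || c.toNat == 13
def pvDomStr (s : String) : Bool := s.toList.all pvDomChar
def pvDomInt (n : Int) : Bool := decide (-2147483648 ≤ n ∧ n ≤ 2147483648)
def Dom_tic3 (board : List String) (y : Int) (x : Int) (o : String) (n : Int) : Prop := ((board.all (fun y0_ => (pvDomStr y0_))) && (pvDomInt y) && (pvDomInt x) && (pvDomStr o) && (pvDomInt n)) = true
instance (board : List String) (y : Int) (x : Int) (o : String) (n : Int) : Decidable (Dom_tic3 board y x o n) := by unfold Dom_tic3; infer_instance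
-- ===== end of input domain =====

-- B replaces A's diagonal recursion by an arithmetic feasibility guard plus a bounded all() scan (alternative decomposition, same cost).


-- ===== PORT A =====
def tic3 (board : List String) (y : Int) (x : Int) (o : String) (n : Int) : Bool :=
  if n = 3 then true
  else if y < 0 ∨ 3 ≤ y ∨ x < 0 ∨ 3 ≤ x then false
  else
    match PySem.List.pyGet? board y with
    | none => false          -- Python raises IndexError here; excluded by Pre_tic3
    | some row =>
      match PySem.Str.pyGet? row x with
      | none => false        -- IndexError; excluded by Pre_tic3
      | some c =>
        if String.ofList [c] = o then tic3 board (y+1) (x+1) o (n+1) else false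
termination_by (3 - y).toNat
decreasing_by omega

-- ===== PORT B =====
-- helper: the one diagonal-cell comparison board[i][j] == o from B's all(); false = IndexError (excluded by Pre_tic3)
def tic3CellEq (board : List String) (i : Int) (j : Int) (o : String) : Bool :=
  match PySem.List.pyGet? board i with
  | none => false
  | some row =>
    match PySem.Str.pyGet? row j with
    | none => false
    | some c => String.ofList [c] = o

def tic3_alt (board : List String) (y : Int) (x : Int) (o : String) (n : Int) : Bool :=
  if 3 ≤ n then n = 3
  else
    let steps : Int := 3 - n
    if y < 0 ∨ x < 0 ∨ 3 < y + steps ∨ 3 < x + steps then false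
    else (PySem.List.pyRange 0 steps 1).all (fun j => tic3CellEq board (y + j) (x + j) o)

-- ===== PRECONDITION & SPEC =====
-- Pre_tic3 excludes inputs where a diagonal cell the scan could touch lies outside the ragged board
-- (there A may raise IndexError); it also excludes a few inputs where A returns False before reaching
-- the missing cell (an early mismatch) — B returns the same False there.
def Pre_tic3 (board : List String) (y : Int) (x : Int) (o : String) (n : Int) : Prop :=
  ∀ k : Nat, k < 3 →
    ((n + k < 3 ∨ 3 < n) ∧ 0 ≤ y ∧ y + k < 3 ∧ 0 ≤ x ∧ x + k < 3) →
    ((PySem.List.pyGet? board (y + k)).bind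
        (fun row => PySem.Str.pyGet? row (x + k))).isSome = true
instance (board : List String) (y : Int) (x : Int) (o : String) (n : Int) : Decidable (Pre_tic3 board y x o n) := by unfold Pre_tic3; infer_instance

def pvWitness_tic3 : List String × Int × Int × String × Int := (["OOX", ".O.", "X.O"], 0, 0, "O", 0)

def Spec_tic3 (board : List String) (y : Int) (x : Int) (o : String) (n : Int) (out : Bool) : Prop := out = tic3_alt board y x o n
instance (board : List String) (y : Int) (x : Int) (o : String) (n : Int) (out : Bool) : Decidable (Spec_tic3 board y x o n out) := by unfold Spec_tic3; infer_instance

-- ===== CLAIM (what is proved, stated in full; the proofs are below) =====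
def Claim_equal_tic3 : Prop := ∀ (board : List String) (y : Int) (x : Int) (o : String) (n : Int), Dom_tic3 board y x o n → Pre_tic3 board y x o n → Spec_tic3 board y x o n (tic3 board y x o n)

-- ===== LEMMAS AND PROOFS =====

-- Pre_tic3 is preserved when the recursion steps to (y+1, x+1, n+1)
lemma pre_step (board : List String) (y x : Int) (o : String) (n : Int)
    (hPre : Pre_tic3 board y x o n) (hy : 0 ≤ y) (hx : 0 ≤ x) (hn : n ≠ 3) :
    Pre_tic3 board (y+1) (x+1) o (n+1) := by
  intro k hk hg
  obtain ⟨hgn, hgy, hgy3, hgx, hgx3⟩ := hg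
  have hk2 : k + 1 < 3 := by omega
  have := hPre (k+1) hk2 (by push_cast; omega)
  have e1 : y + 1 + (k : Int) = y + ((k : Nat) + 1 : Nat) := by push_cast; ring
  have e2 : x + 1 + (k : Int) = x + ((k : Nat) + 1 : Nat) := by push_cast; ring
  rw [e1, e2]
  exact this

-- A returns False whenever n stands no chance of reaching 3 inside the grid
lemma tic3_false (s : Nat) : ∀ (board : List String) (y x : Int) (o : String) (n : Int),
    3 - y ≤ (s : Int) → Pre_tic3 board y x o n →
    (3 < n ∨ (n < 3 ∧ (n < y ∨ n < x))) → tic3 board y x o n = false := by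
  induction s with
  | zero =>
    intro board y x o n hs hPre hcase
    rw [tic3]
    have hn3 : ¬ n = 3 := by omega
    have hb : y < 0 ∨ 3 ≤ y ∨ x < 0 ∨ 3 ≤ x := by omega
    simp [hn3, hb]
  | succ s ih =>
    intro board y x o n hs hPre hcase
    rw [tic3]
    have hn3 : ¬ n = 3 := by omega
    by_cases hb : y < 0 ∨ 3 ≤ y ∨ x < 0 ∨ 3 ≤ x
    · simp [hn3, hb]
    · push Not at hb
      obtain ⟨hy0, hy3, hx0, hx3⟩ := hb
      have hcell := hPre 0 (by omega) (by push_cast; omega)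
      simp only [Nat.cast_zero, add_zero] at hcell
      rcases hrow : PySem.List.pyGet? board y with _ | row
      · rw [hrow] at hcell; simp at hcell
      · rw [hrow] at hcell
        have hcell' : (PySem.Str.pyGet? row x).isSome = true := hcell
        rcases hc : PySem.Str.pyGet? row x with _ | c
        · rw [hc] at hcell'; simp at hcell'
        · simp only [hn3, if_false, hc]
          have hb' : ¬ (y < 0 ∨ 3 ≤ y ∨ x < 0 ∨ 3 ≤ x) := by omega
          simp only [hb', if_false]
          by_cases hm : String.ofList [c] = o
          · simp only [hm, if_true]
            apply ih board (y+1) (x+1) o (n+1) (by omega)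
              (pre_step board y x o n hPre hy0 hx0 hn3)
            rcases hcase with h | ⟨h1, h2⟩
            · left; omega
            · right
              constructor
              · rcases h2 with h2 | h2 <;> omega
              · rcases h2 with h2 | h2
                · left; omega
                · right; omega
          · simp [hm]

-- when a win is arithmetically feasible, A equals the s-cell conjunction of diagonal matches
lemma tic3_diag (s : Nat) : ∀ (board : List String) (y x : Int) (o : String) (n : Int),
    n + s = 3 → 0 ≤ y → y + s ≤ 3 → 0 ≤ x → x + s ≤ 3 → Pre_tic3 board y x o n →
    tic3 board y x o n = (List.range s).all (fun j => tic3CellEq board (y + j) (x + j) o) := by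
  induction s with
  | zero =>
    intro board y x o n hn hy0 hy3 hx0 hx3 hPre
    have hn3 : n = 3 := by omega
    rw [tic3]
    simp [hn3]
  | succ s ih =>
    intro board y x o n hn hy0 hy3 hx0 hx3 hPre
    have hn3 : ¬ n = 3 := by omega
    have hb : ¬ (y < 0 ∨ 3 ≤ y ∨ x < 0 ∨ 3 ≤ x) := by push_cast at hy3 hx3; omega
    have hcell := hPre 0 (by omega) (by push_cast at hn ⊢; omega)
    rw [tic3]
    simp only [Nat.cast_zero, add_zero] at hcell
    rcases hrow : PySem.List.pyGet? board y with _ | row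
    · rw [hrow] at hcell; simp at hcell
    · rw [hrow] at hcell
      have hcell' : (PySem.Str.pyGet? row x).isSome = true := hcell
      rcases hc : PySem.Str.pyGet? row x with _ | c
      · rw [hc] at hcell'; simp at hcell'
      · rw [List.range_succ_eq_map]
        simp only [if_neg hn3, if_neg hb, hc, List.all_cons, List.all_map, Nat.cast_zero,
          add_zero]
        have h0 : tic3CellEq board y x o = (String.ofList [c] = o : Bool) := by
          simp only [tic3CellEq, hrow, hc]
        rw [h0]
        by_cases hm : String.ofList [c] = o
        · rw [if_pos hm, ih board (y+1) (x+1) o (n+1) (by push_cast at hn ⊢; omega) (by omega)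
            (by push_cast at hy3 ⊢; omega) (by omega) (by push_cast at hx3 ⊢; omega)
            (pre_step board y x o n hPre hy0 hx0 hn3)]
          simp only [hm, decide_true, Bool.true_and]
          have hfun : ((fun j : Nat => tic3CellEq board (y + ↑j) (x + ↑j) o) ∘ Nat.succ)
              = (fun j : Nat => tic3CellEq board (y + 1 + ↑j) (x + 1 + ↑j) o) := by
            funext j
            simp only [Function.comp_apply]
            push_cast
            ring_nf
          rw [hfun]
        · rw [if_neg hm]
          simp [hm]

-- ===== VERDICT (by name: the statement is the Claim_ definition above) =====
theorem tic3_spec : Claim_equal_tic3 := by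
  intro board y x o n _ hPre
  unfold Spec_tic3 tic3_alt
  by_cases h3 : (3:Int) ≤ n
  · by_cases he : n = 3
    · subst he
      rw [tic3]
      simp
    · have hgt : 3 < n := by omega
      rw [tic3_false ((3 - y).toNat) board y x o n (by omega) hPre (Or.inl hgt)]
      simp [h3, he]
  · simp only [h3, if_false]
    by_cases hg : y < 0 ∨ x < 0 ∨ 3 < y + (3 - n) ∨ 3 < x + (3 - n)
    · simp only [hg, if_true]
      by_cases hyx : y < 0 ∨ x < 0
      · rw [tic3]
        have hn3 : ¬ n = 3 := by omega
        have hb : y < 0 ∨ 3 ≤ y ∨ x < 0 ∨ 3 ≤ x := by omega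
        simp [if_neg hn3, hb]
      · apply tic3_false ((3 - y).toNat) board y x o n (by omega) hPre
        right
        refine ⟨by omega, by omega⟩
    · push Not at hg
      obtain ⟨hy0, hx0, hy3, hx3⟩ := hg
      simp only [show ¬(y < 0 ∨ x < 0 ∨ 3 < y + (3 - n) ∨ 3 < x + (3 - n)) by omega, if_false]
      rw [tic3_diag ((3 - n).toNat) board y x o n (by omega) hy0 (by omega) hx0 (by omega) hPre]
      rw [PySem.List.pyRange_one, List.all_map]
      have hlen : ((3 : Int) - n - 0).toNat = (3 - n).toNat := by omega
      rw [hlen]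
      have hfun : ((fun j : Int => tic3CellEq board (y + j) (x + j) o) ∘ fun k : Nat => 0 + (k : Int))
          = (fun j : Nat => tic3CellEq board (y + ↑j) (x + ↑j) o) := by
        funext j
        simp
      rw [hfun]
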